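-- pv_equiv track=rewrite | github.com/queelius/computational-explorations | src/space_time_tradeoffs.py | _find_new_cliques_from_neighbors
-- ===== SOURCE A (Python) =====
-- from typing import Dict, FrozenSet, List, Optional, Set, Tuple
--
-- def _find_new_cliques_from_neighbors(
--     n: int, k: int,
--     neighbors: List[int],
--     adj: Dict[int, Set[int]],
-- ) -> List[Tuple[int, ...]]:
--     """Find all k-cliques containing vertex n, given its sorted neighbors."""
--     if k < 1:
--         return []
--     if k == 1:
--         return [(n,)]
--
--     cliques: List[Tuple[int, ...]] = []
--
--     def extend(current: List[int], candidates: List[int]):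
--         if len(current) == k - 1:
--             cliques.append(tuple(sorted(current + [n])))
--             return
--         needed = (k - 1) - len(current)
--         for idx, v in enumerate(candidates):
--             if len(candidates) - idx < needed:
--                 break
--             if all(v in adj[u] for u in current):
--                 new_cands = [w for w in candidates[idx + 1:] if w in adj[v]]
--                 extend(current + [v], new_cands)
--
--     extend([], neighbors)
--     return cliques
-- ===== SOURCE B (Python) =====
-- from itertools import combinations
--
--
-- def _is_clique(combo, adj):
--     for i, u in enumerate(combo):
--         for v in combo[i + 1:]:
--             if v not in adj[u]:
--                 return False
--     return True
--
--
-- def _find_new_cliques_from_neighbors(n, k, neighbors, adj):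
--     if k < 1 or len(neighbors) < k - 1:
--         return []
--     return [tuple(sorted(c + (n,)))
--             for c in combinations(neighbors, k - 1)
--             if _is_clique(c, adj)]
-- ===== Notes on version B (the rewrite author's own statement) =====
-- stated objective: simpler
-- what changed: Replaces A's recursive backtracking extend() with progressive candidate-list filtering by a flat generate-and-test pass over lexicographic (k-1)-combinations of the neighbor list (with the standard early-out when fewer than k-1 neighbors exist), keeping those combinations that are pairwise adjacent.
-- outside the precondition, e.g. on _find_new_cliques_from_neighbors(0, 3, [1, 2], {1: set()}): A returns [], B returns []
import Mathlib
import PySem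

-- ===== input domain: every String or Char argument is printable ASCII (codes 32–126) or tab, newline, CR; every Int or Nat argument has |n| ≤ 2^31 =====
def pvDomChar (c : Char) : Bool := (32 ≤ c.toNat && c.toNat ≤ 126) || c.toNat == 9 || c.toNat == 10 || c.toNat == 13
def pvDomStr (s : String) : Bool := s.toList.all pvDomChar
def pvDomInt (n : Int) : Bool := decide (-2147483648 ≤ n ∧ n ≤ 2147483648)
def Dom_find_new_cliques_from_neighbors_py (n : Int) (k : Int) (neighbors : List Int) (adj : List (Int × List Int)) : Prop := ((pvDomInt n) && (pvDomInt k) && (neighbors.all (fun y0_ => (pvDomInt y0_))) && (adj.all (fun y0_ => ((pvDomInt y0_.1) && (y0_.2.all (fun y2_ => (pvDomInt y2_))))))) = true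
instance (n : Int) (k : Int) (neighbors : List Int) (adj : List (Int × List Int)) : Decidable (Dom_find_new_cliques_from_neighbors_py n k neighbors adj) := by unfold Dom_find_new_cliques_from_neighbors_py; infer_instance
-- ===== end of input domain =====

-- B replaces A's recursive candidate-filtering DFS by a flat generate-and-test pass over
-- lexicographic (k-1)-combinations of the neighbor list (objective: simpler).
-- Equivalence is about the RETURN value; neither program mutates its arguments.

-- ===== PORT A =====
-- adj[u] as a first-match association-list lookup; under Pre_ every key looked up is present,
-- so the [] default is never the value Python would have raised on.
def adjGet (adj : List (Int × List Int)) (u : Int) : List Int :=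
  match adj.find? (fun p => p.1 == u) with
  | some p => p.2
  | none => []

mutual
-- the inner `extend(current, candidates)` closure of A
def extendA (n : Int) (k : Int) (adj : List (Int × List Int))
    (current : List Int) (candidates : List Int) : List (List Int) :=
  if (current.length : Int) = k - 1 then
    [PySem.List.sorted (current ++ [n]) (fun x => x) false]
  else
    loopA n k adj current ((k - 1) - (current.length : Int)) candidates
termination_by 2 * candidates.length + 1
decreasing_by simp_wf <;> omega

-- the `for idx, v in enumerate(candidates)` loop with its break
def loopA (n : Int) (k : Int) (adj : List (Int × List Int))
    (current : List Int) (needed : Int) (rest : List Int) : List (List Int) :=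
  match rest with
  | [] => []
  | v :: tail =>
    if ((tail.length : Int) + 1 < needed) then []
    else
      (if current.all (fun u => (adjGet adj u).contains v) then
         extendA n k adj (current ++ [v]) (tail.filter (fun w => (adjGet adj v).contains w))
       else []) ++ loopA n k adj current needed tail
termination_by 2 * rest.length
decreasing_by
  all_goals simp_wf
  all_goals
    first
      | omega
      | (have h1 := List.length_filter_le (fun w => (adjGet adj v).contains w) tail
         have h2 := List.length_filter_le (fun w => decide (w ∈ adjGet adj v)) tail
         omega)
end

def find_new_cliques_from_neighbors_py (n : Int) (k : Int) (neighbors : List Int) (adj : List (Int × List Int)) : List (List Int) :=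
  if k < 1 then []
  else if k = 1 then [[n]]
  else extendA n k adj [] neighbors

-- ===== PORT B =====
-- itertools.combinations(xs, m) in its lexicographic index order
def combosB : Nat → List Int → List (List Int)
  | 0, _ => [[]]
  | _ + 1, [] => []
  | m + 1, x :: xs => (combosB m xs).map (fun c => x :: c) ++ combosB (m + 1) xs

-- _is_clique: every later element adjacent to every earlier one
def cliqueOkB (adj : List (Int × List Int)) : List Int → Bool
  | [] => true
  | u :: rest => rest.all (fun v => (adjGet adj u).contains v) && cliqueOkB adj rest

def find_new_cliques_from_neighbors_py_alt (n : Int) (k : Int) (neighbors : List Int) (adj : List (Int × List Int)) : List (List Int) :=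
  if k < 1 ∨ (neighbors.length : Int) < k - 1 then []
  else ((combosB (k - 1).toNat neighbors).filter (cliqueOkB adj)).map
         (fun c => PySem.List.sorted (c ++ [n]) (fun x => x) false)

-- ===== PRECONDITION & SPEC =====
-- Pre_ excludes inputs where k ≥ 2, at least k-1 neighbors are listed, and some neighbor has no
-- adjacency entry: Python A raises KeyError on almost all of them; on the few such inputs where
-- A's break skips the missing lookup and A still returns, B returns the same value (see cites).
def Pre_find_new_cliques_from_neighbors_py (n : Int) (k : Int) (neighbors : List Int) (adj : List (Int × List Int)) : Prop :=
  k ≤ 1 ∨ (neighbors.length : Int) < k - 1 ∨ neighbors.all (fun v => adj.any (fun p => p.1 == v)) = true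
instance (n : Int) (k : Int) (neighbors : List Int) (adj : List (Int × List Int)) : Decidable (Pre_find_new_cliques_from_neighbors_py n k neighbors adj) := by unfold Pre_find_new_cliques_from_neighbors_py; infer_instance

def pvWitness_find_new_cliques_from_neighbors_py : Int × Int × List Int × (List (Int × List Int)) :=
  (1, 3, [2, 3, 4], [(2, [3, 4, 1]), (3, [2, 4, 1]), (4, [2, 3, 1])])

def Spec_find_new_cliques_from_neighbors_py (n : Int) (k : Int) (neighbors : List Int) (adj : List (Int × List Int)) (out : List (List Int)) : Prop := out = find_new_cliques_from_neighbors_py_alt n k neighbors adj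
instance (n : Int) (k : Int) (neighbors : List Int) (adj : List (Int × List Int)) (out : List (List Int)) : Decidable (Spec_find_new_cliques_from_neighbors_py n k neighbors adj out) := by unfold Spec_find_new_cliques_from_neighbors_py; infer_instance

-- ===== CLAIM (what is proved, stated in full; the proofs are below) =====
def Claim_equal_find_new_cliques_from_neighbors_py : Prop := ∀ (n : Int) (k : Int) (neighbors : List Int) (adj : List (Int × List Int)), Dom_find_new_cliques_from_neighbors_py n k neighbors adj → Pre_find_new_cliques_from_neighbors_py n k neighbors adj → Spec_find_new_cliques_from_neighbors_py n k neighbors adj (find_new_cliques_from_neighbors_py n k neighbors adj)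

-- ===== LEMMAS AND PROOFS =====

theorem combosB_nil_of_lt : ∀ (l : List Int) (m : Nat), l.length < m → combosB m l = [] := by
  intro l
  induction l with
  | nil => intro m hm; match m, hm with | m + 1, _ => rfl
  | cons x xs ih =>
    intro m hm
    match m, hm with
    | m + 1, hm =>
      simp only [combosB]
      rw [ih m (by simpa using hm), ih (m + 1) (by simp at hm ⊢; omega)]
      rfl

theorem combosB_filter (p : Int → Bool) : ∀ (l : List Int) (m : Nat),
    combosB m (l.filter p) = (combosB m l).filter (fun c => c.all p) := by
  intro l
  induction l with
  | nil => intro m; cases m <;> simp [combosB]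
  | cons x xs ih =>
    intro m
    cases m with
    | zero =>
      by_cases hx : p x = true <;> simp [hx, combosB]
    | succ m =>
      by_cases hx : p x = true
      · rw [List.filter_cons, if_pos hx]
        simp only [combosB, ih, List.filter_append, List.filter_map]
        congr 2
        apply List.filter_congr
        intro c _
        simp [hx]
      · rw [List.filter_cons, if_neg hx]
        simp only [combosB, ih, List.filter_append, List.filter_map]
        have h0 : List.filter ((fun c => c.all p) ∘ fun c => x :: c) (combosB m xs) = [] := by
          apply List.filter_eq_nil_iff.2
          intro c _
          simp [hx]
        rw [h0]
        simp

mutual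
theorem extendA_eq (n : Int) (k : Int) (adj : List (Int × List Int))
    (current : List Int) (candidates : List Int)
    (hlen : (current.length : Int) ≤ k - 1)
    (hinv : ∀ u ∈ current, ∀ v ∈ candidates, (adjGet adj u).contains v = true) :
    extendA n k adj current candidates =
      ((combosB (k - 1 - (current.length : Int)).toNat candidates).filter (cliqueOkB adj)).map
        (fun c => PySem.List.sorted ((current ++ c) ++ [n]) (fun x => x) false) := by
  rw [extendA]
  by_cases hb : (current.length : Int) = k - 1
  · rw [if_pos hb]
    have : (k - 1 - (current.length : Int)).toNat = 0 := by omega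
    simp [this, combosB, cliqueOkB]
  · rw [if_neg hb]
    exact loopA_eq n k adj current ((k - 1) - (current.length : Int)) candidates
      rfl (by omega) (fun v hv u hu => hinv u hu v hv)
termination_by 2 * candidates.length + 1
decreasing_by simp_wf <;> omega

theorem loopA_eq (n : Int) (k : Int) (adj : List (Int × List Int))
    (current : List Int) (needed : Int) (rest : List Int)
    (hneed : needed = (k - 1) - (current.length : Int))
    (hlt : (current.length : Int) < k - 1)
    (hinv : ∀ v ∈ rest, ∀ u ∈ current, (adjGet adj u).contains v = true) :
    loopA n k adj current needed rest =
      ((combosB needed.toNat rest).filter (cliqueOkB adj)).map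
        (fun c => PySem.List.sorted ((current ++ c) ++ [n]) (fun x => x) false) := by
  have hpos : 1 ≤ needed := by omega
  match rest with
  | [] =>
    rw [loopA]
    obtain ⟨m, hm⟩ : ∃ m, needed.toNat = m + 1 := ⟨needed.toNat - 1, by omega⟩
    rw [hm]
    rfl
  | v :: tail =>
    rw [loopA]
    by_cases hbr : ((tail.length : Int) + 1 < needed)
    · rw [if_pos hbr]
      rw [combosB_nil_of_lt (v :: tail) needed.toNat (by simp; omega)]
      rfl
    · rw [if_neg hbr]
      have hall : current.all (fun u => (adjGet adj u).contains v) = true := by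
        simp only [List.all_eq_true]
        intro u hu
        exact hinv v (by simp) u hu
      rw [if_pos hall]
      obtain ⟨m, hm⟩ : ∃ m, needed.toNat = m + 1 := ⟨needed.toNat - 1, by omega⟩
      have hlapp : (current ++ [v]).length = current.length + 1 := by simp
      have hrec := extendA_eq n k adj (current ++ [v])
          (tail.filter (fun w => (adjGet adj v).contains w))
          (by rw [hlapp]; push_cast; omega)
          (by
            intro u hu w hw
            rcases List.mem_append.1 hu with hu | hu
            · exact hinv w (List.mem_cons_of_mem _ (List.mem_of_mem_filter hw)) u hu
            · have : u = v := by simpa using hu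
              subst this
              exact List.of_mem_filter hw)
      have hm' : (k - 1 - ((current ++ [v]).length : Int)).toNat = m := by
        rw [hlapp]
        push_cast
        omega
      rw [hm'] at hrec
      rw [hrec, loopA_eq n k adj current needed tail hneed hlt
            (fun w hw u hu => hinv w (List.mem_cons_of_mem _ hw) u hu)]
      rw [hm]
      show _ = ((((combosB m tail).map (fun c => v :: c)) ++ combosB (m + 1) tail).filter
          (cliqueOkB adj)).map _
      rw [List.filter_append, List.map_append]
      congr 1
      rw [combosB_filter, List.filter_filter, List.filter_map, List.map_map]
      congr 1
      · funext c
        simp [Function.comp, List.append_assoc]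
      · apply List.filter_congr
        intro c _
        simp [Function.comp, cliqueOkB, Bool.and_comm]
termination_by 2 * rest.length
decreasing_by
  all_goals simp_wf
  all_goals
    first
      | omega
      | (have h1 := List.length_filter_le (fun w => (adjGet adj v).contains w) tail
         have h2 := List.length_filter_le (fun w => decide (w ∈ adjGet adj v)) tail
         omega)
end

theorem sorted_singleton (n : Int) :
    PySem.List.sorted [n] (fun x => x) false = [n] := by
  apply PySem.List.sorted_eq_self_of_pairwise
  simp

-- ===== VERDICT (by name: the statement is the Claim_ definition above) =====
theorem find_new_cliques_from_neighbors_py_spec : Claim_equal_find_new_cliques_from_neighbors_py := by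
  intro n k neighbors adj _hdom _hpre
  unfold Spec_find_new_cliques_from_neighbors_py
  unfold find_new_cliques_from_neighbors_py find_new_cliques_from_neighbors_py_alt
  by_cases h1 : k < 1
  · simp [h1]
  · rw [if_neg h1]
    by_cases h2 : k = 1
    · subst h2
      simp [combosB, cliqueOkB, sorted_singleton]
    · rw [if_neg h2]
      have hmain := extendA_eq n k adj [] neighbors (by simp; omega) (by simp)
      simp only [List.length_nil, Nat.cast_zero, Int.sub_zero, List.nil_append] at hmain
      by_cases h3 : (neighbors.length : Int) < k - 1
      · rw [if_pos (Or.inr h3), hmain,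
          combosB_nil_of_lt neighbors (k - 1).toNat (by omega)]
        rfl
      · rw [if_neg (by push_neg; exact ⟨by omega, by omega⟩)]
        exact hmain
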